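-- pv_equiv track=rewrite | github.com/eyereasoner/eye | eyezero/branches/cicadas.py | union_overlap_count_fast
-- ===== SOURCE A (Python) =====
-- def union_overlap_count_fast(C: int, predator_periods, H: int, offsets, precomp):
--     """
--     Fast union-overlap count using arithmetic progressions over cicada-emergence indices.
--     - C: cicada cycle
--     - predator_periods: list of P
--     - H: horizon (inclusive)
--     - offsets: list of o for each predator
--     - precomp: output of prepare_index_maps(C, predator_periods)
--     """
--     n = H // C                   # number of cicada emergences within [1..H]
--     marked = bytearray(n)        # marked[i] == 1 means emergence index (i+1) overlaps some predator
--     for (P, g, Pprime, invCprime), o in zip(precomp, offsets):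
--         o_mod = o % P
--         if o_mod % g != 0:
--             continue  # no solution to C*k ≡ o (mod P)
--         if Pprime == 1:
--             # Every emergence index k is a solution (period divides C and offset aligns)
--             for i in range(n):
--                 marked[i] = 1
--             continue
--         r = (o_mod // g) % Pprime
--         k0 = (r * invCprime) % Pprime  # solution class for k modulo P'
--         # k runs over positive integers; convert to first k >= 1
--         k_first = k0 if k0 >= 1 else Pprime
--         # Mark all k = k_first + t*P'  up to n
--         i = k_first - 1
--         step = Pprime
--         while i < n:
--             marked[i] = 1
--             i += step
--     return sum(marked)
-- ===== SOURCE B (Python) =====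
-- def union_overlap_count_fast(C: int, predator_periods, H: int, offsets, precomp):
--     # Per-index counting instead of per-predator progression marking:
--     # reduce each solvable predator to its residue class (P', k0) once, then
--     # count the emergence indices k in [1..n] hitting any class directly.
--     n = H // C
--     classes = []
--     for (P, g, Pprime, invCprime), o in zip(precomp, offsets):
--         o_mod = o % P
--         if o_mod % g == 0:
--             classes.append((Pprime, ((o_mod // g) % Pprime * invCprime) % Pprime))
--     return sum(1 for k in range(1, n + 1)
--                if any(k % Pp == k0 for Pp, k0 in classes))
-- ===== Notes on version B (the rewrite author's own statement) =====
-- stated objective: alternative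
-- what changed: Replaces the mutable sieve (bytearray marked per predator along arithmetic progressions, with a special 'mark all' branch for P'==1) by first reducing each solvable predator to its residue class (P', k0) and then directly counting indices k in 1..n whose residue hits any class; no mutation, no special case.
import Mathlib
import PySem

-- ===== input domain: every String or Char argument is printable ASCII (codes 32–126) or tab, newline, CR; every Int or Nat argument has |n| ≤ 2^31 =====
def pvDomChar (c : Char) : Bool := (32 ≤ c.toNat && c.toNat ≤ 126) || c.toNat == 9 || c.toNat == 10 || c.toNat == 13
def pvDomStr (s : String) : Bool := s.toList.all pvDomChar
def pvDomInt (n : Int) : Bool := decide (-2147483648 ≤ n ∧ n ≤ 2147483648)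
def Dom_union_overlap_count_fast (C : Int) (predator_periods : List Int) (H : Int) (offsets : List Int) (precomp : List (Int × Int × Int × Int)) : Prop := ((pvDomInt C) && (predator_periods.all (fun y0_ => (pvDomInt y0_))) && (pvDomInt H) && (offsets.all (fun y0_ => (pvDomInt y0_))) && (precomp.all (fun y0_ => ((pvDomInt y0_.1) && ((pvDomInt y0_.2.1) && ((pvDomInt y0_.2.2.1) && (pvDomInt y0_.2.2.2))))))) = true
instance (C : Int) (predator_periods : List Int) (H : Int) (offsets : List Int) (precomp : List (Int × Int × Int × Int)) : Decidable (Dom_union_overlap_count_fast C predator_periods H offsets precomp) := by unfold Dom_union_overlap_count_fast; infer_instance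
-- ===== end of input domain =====

-- B replaces A's mutable sieve (marking arithmetic progressions in a bytearray, with a
-- special 'mark all' branch for P'==1) by reducing each solvable predator to its residue
-- class (P', k0) once and directly counting the indices k in 1..n that hit any class
-- (objective: alternative, mutation-free counting; same results, no speed claim).

-- ===== PORT A =====
-- while i < n: marked[i] = 1; i += step   (the guard 0 < step only makes the recursion
-- total; inside Pre_ the Python loop always has step = Pprime ≥ 1)
def pvMarkWhile (n step : Int) (i : Int) (marked : List Int) : List Int :=
  if h : i < n ∧ 0 < step then pvMarkWhile n step (i + step) (marked.set i.toNat 1)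
  else marked
termination_by (n - i).toNat
decreasing_by omega

-- for i in range(n): marked[i] = 1
def pvMarkAll (n : Int) (marked : List Int) : List Int :=
  (PySem.List.pyRange 0 n 1).foldl (fun m i => m.set i.toNat 1) marked

-- the body of A's for-loop over zip(precomp, offsets)
def pvStepA (n : Int) (marked : List Int) (x : (Int × Int × Int × Int) × Int) : List Int :=
  match x with
  | ((P, g, Pprime, invCprime), o) =>
    let o_mod := PySem.Int.mod o P
    if PySem.Int.mod o_mod g ≠ 0 then marked
    else if Pprime = 1 then pvMarkAll n marked
    else
      let r := PySem.Int.mod (PySem.Int.floordiv o_mod g) Pprime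
      let k0 := PySem.Int.mod (r * invCprime) Pprime
      let k_first := if 1 ≤ k0 then k0 else Pprime
      pvMarkWhile n Pprime (k_first - 1) marked

def union_overlap_count_fast (C : Int) (predator_periods : List Int) (H : Int) (offsets : List Int) (precomp : List (Int × Int × Int × Int)) : Int :=
  let n := PySem.Int.floordiv H C
  -- bytearray(n); n ≥ 0 inside Pre_
  ((precomp.zip offsets).foldl (pvStepA n) (List.replicate n.toNat 0)).sum

-- ===== PORT B =====
-- the body of B's for-loop building `classes`
def pvStepB (acc : List (Int × Int)) (x : (Int × Int × Int × Int) × Int) : List (Int × Int) :=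
  match x with
  | ((P, g, Pprime, invCprime), o) =>
    let o_mod := PySem.Int.mod o P
    if PySem.Int.mod o_mod g = 0 then
      acc ++ [(Pprime, PySem.Int.mod (PySem.Int.mod (PySem.Int.floordiv o_mod g) Pprime * invCprime) Pprime)]
    else acc

def union_overlap_count_fast_alt (C : Int) (predator_periods : List Int) (H : Int) (offsets : List Int) (precomp : List (Int × Int × Int × Int)) : Int :=
  let n := PySem.Int.floordiv H C
  let classes := (precomp.zip offsets).foldl pvStepB []
  (((PySem.List.pyRange 1 (n + 1) 1).filter
      (fun k => classes.any (fun c => PySem.Int.mod k c.1 == c.2))).length : Int)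

-- ===== PRECONDITION & SPEC =====
-- Pre_ is exactly where the Python A returns normally: C ≠ 0 (else ZeroDivisionError),
-- H // C ≥ 0 (else bytearray(n) raises ValueError), and for each zipped predator P ≠ 0 and
-- g ≠ 0 (else ZeroDivisionError) and, when the congruence is solvable, Pprime ≥ 1 (Pprime = 0
-- raises ZeroDivisionError; Pprime < 0 makes the while-loop index fall below -n, IndexError).
def Pre_union_overlap_count_fast (C : Int) (predator_periods : List Int) (H : Int) (offsets : List Int) (precomp : List (Int × Int × Int × Int)) : Prop :=
  C ≠ 0 ∧ 0 ≤ PySem.Int.floordiv H C ∧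
  ∀ x ∈ precomp.zip offsets,
    x.1.1 ≠ 0 ∧ x.1.2.1 ≠ 0 ∧
    (PySem.Int.mod (PySem.Int.mod x.2 x.1.1) x.1.2.1 = 0 → 1 ≤ x.1.2.2.1)
instance (C : Int) (predator_periods : List Int) (H : Int) (offsets : List Int) (precomp : List (Int × Int × Int × Int)) : Decidable (Pre_union_overlap_count_fast C predator_periods H offsets precomp) := by unfold Pre_union_overlap_count_fast; infer_instance

def pvWitness_union_overlap_count_fast : Int × List Int × Int × List Int × (List (Int × Int × Int × Int)) :=
  (2, [3], 10, [1], [(3, 1, 3, 2)])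

def Spec_union_overlap_count_fast (C : Int) (predator_periods : List Int) (H : Int) (offsets : List Int) (precomp : List (Int × Int × Int × Int)) (out : Int) : Prop := out = union_overlap_count_fast_alt C predator_periods H offsets precomp
instance (C : Int) (predator_periods : List Int) (H : Int) (offsets : List Int) (precomp : List (Int × Int × Int × Int)) (out : Int) : Decidable (Spec_union_overlap_count_fast C predator_periods H offsets precomp out) := by unfold Spec_union_overlap_count_fast; infer_instance

-- ===== CLAIM (what is proved, stated in full; the proofs are below) =====
def Claim_equal_union_overlap_count_fast : Prop := ∀ (C : Int) (predator_periods : List Int) (H : Int) (offsets : List Int) (precomp : List (Int × Int × Int × Int)), Dom_union_overlap_count_fast C predator_periods H offsets precomp → Pre_union_overlap_count_fast C predator_periods H offsets precomp → Spec_union_overlap_count_fast C predator_periods H offsets precomp (union_overlap_count_fast C predator_periods H offsets precomp)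

-- ===== LEMMAS AND PROOFS =====

-- the 0/1 indicator B's classes induce on 0-based index j (emergence index j+1)
def pvInd (classes : List (Int × Int)) (j : Nat) : Int :=
  if classes.any (fun c => PySem.Int.mod ((j : Int) + 1) c.1 == c.2) then 1 else 0

theorem pvMarkAll_getElem? (a n : Int) (m : List Int) (j : Nat) (ha : 0 ≤ a) :
    ((PySem.List.pyRange a n 1).foldl (fun m i => m.set i.toNat 1) m)[j]? =
      if a ≤ (j : Int) ∧ (j : Int) < n ∧ j < m.length then some 1 else m[j]? := by
  by_cases hlt : a < n
  · rw [PySem.List.pyRange_one_cons hlt]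
    simp only [List.foldl_cons]
    rw [pvMarkAll_getElem? (a + 1) n (m.set a.toNat 1) j (by omega),
      List.length_set, List.getElem?_set]
    rcases Nat.lt_or_ge j m.length with hjl | hjl
    · by_cases hja : a.toNat = j
      · rw [if_pos hja, if_pos (show a.toNat < m.length by omega),
          if_neg (show ¬(a + 1 ≤ (j : Int) ∧ (j : Int) < n ∧ j < m.length) by omega),
          if_pos (show a ≤ (j : Int) ∧ (j : Int) < n ∧ j < m.length by
            refine ⟨by omega, by omega, hjl⟩)]
      · rw [if_neg hja]
        by_cases hcond : a + 1 ≤ (j : Int) ∧ (j : Int) < n ∧ j < m.length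
        · rw [if_pos hcond, if_pos (by omega)]
        · rw [if_neg hcond, if_neg (by omega)]
    · have hmn : m[j]? = none := List.getElem?_eq_none (by omega)
      have hc1 : ¬(a + 1 ≤ (j : Int) ∧ (j : Int) < n ∧ j < m.length) := by omega
      have hc2 : ¬(a ≤ (j : Int) ∧ (j : Int) < n ∧ j < m.length) := by omega
      rw [if_neg hc1, if_neg hc2, hmn]
      by_cases hja : a.toNat = j
      · rw [if_pos hja, if_neg (show ¬ a.toNat < m.length by omega)]
      · rw [if_neg hja]
  · rw [PySem.List.pyRange_one_eq_nil (by omega)]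
    simp only [List.foldl_nil]
    rw [if_neg (by omega)]
termination_by (n - a).toNat
decreasing_by omega

theorem pvMarkWhile_getElem? (n step i : Int) (m : List Int) (j : Nat)
    (hstep : 0 < step) (hi : 0 ≤ i) :
    (pvMarkWhile n step i m)[j]? =
      if i ≤ (j : Int) ∧ (j : Int) < n ∧ j < m.length ∧ step ∣ ((j : Int) - i)
      then some 1 else m[j]? := by
  by_cases hlt : i < n
  · rw [pvMarkWhile, dif_pos ⟨hlt, hstep⟩,
      pvMarkWhile_getElem? n step (i + step) (m.set i.toNat 1) j hstep (by omega),
      List.length_set, List.getElem?_set]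
    rcases Nat.lt_or_ge j m.length with hjl | hjl
    · by_cases hja : i.toNat = j
      · have hji : (j : Int) = i := by omega
        rw [if_neg (fun h => absurd h.1 (by omega)), if_pos hja,
          if_pos (show i.toNat < m.length by omega),
          if_pos (show i ≤ (j : Int) ∧ (j : Int) < n ∧ j < m.length ∧ step ∣ ((j : Int) - i) from
            ⟨by omega, by omega, hjl, by rw [hji, sub_self]; exact dvd_zero step⟩)]
      · rw [if_neg hja]
        by_cases hcond : i ≤ (j : Int) ∧ (j : Int) < n ∧ j < m.length ∧ step ∣ ((j : Int) - i)
        · obtain ⟨h1, h2, h3, t, ht⟩ := hcond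
          have hji : (j : Int) ≠ i := by omega
          have htpos : 1 ≤ t := by
            by_cases h : t ≤ 0
            · exfalso
              have hts : step * t ≤ 0 := mul_nonpos_of_nonneg_of_nonpos (le_of_lt hstep) h
              omega
            · omega
          have hstep_le : step ≤ (j : Int) - i := by
            calc step = step * 1 := (mul_one step).symm
              _ ≤ step * t := by
                  apply mul_le_mul_of_nonneg_left htpos (le_of_lt hstep)
              _ = (j : Int) - i := ht.symm
          rw [if_pos (show i + step ≤ (j : Int) ∧ (j : Int) < n ∧ j < m.length ∧
                step ∣ ((j : Int) - (i + step)) from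
              ⟨by omega, h2, h3, ⟨t - 1, by rw [mul_sub, mul_one, ← ht]; ring⟩⟩),
            if_pos ⟨h1, h2, h3, ⟨t, ht⟩⟩]
        · rw [if_neg hcond]
          rw [if_neg (fun h => hcond ⟨by
              have := h.1; omega, h.2.1, h.2.2.1, by
              obtain ⟨t, ht⟩ := h.2.2.2
              exact ⟨t + 1, by rw [mul_add, mul_one]; omega⟩⟩)]
    · have hmn : m[j]? = none := List.getElem?_eq_none (by omega)
      have hc1 : ¬(i + step ≤ (j : Int) ∧ (j : Int) < n ∧ j < m.length ∧
          step ∣ ((j : Int) - (i + step))) := fun h => absurd h.2.2.1 (by omega)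
      have hc2 : ¬(i ≤ (j : Int) ∧ (j : Int) < n ∧ j < m.length ∧
          step ∣ ((j : Int) - i)) := fun h => absurd h.2.2.1 (by omega)
      rw [if_neg hc1, if_neg hc2, hmn]
      by_cases hja : i.toNat = j
      · rw [if_pos hja, if_neg (show ¬ i.toNat < m.length by omega)]
      · rw [if_neg hja]
  · rw [pvMarkWhile, dif_neg (fun h => hlt h.1),
      if_neg (fun h => hlt (lt_of_le_of_lt h.1 h.2.1))]
termination_by (n - i).toNat
decreasing_by omega

-- k ≥ 1 lies in the residue class k0 (mod Pp) iff A's progression from k_first reaches it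
theorem pvResidue_iff (Pp k0 k : Int) (hPp : 0 < Pp) (hk : 1 ≤ k)
    (hk0 : 0 ≤ k0 ∧ k0 < Pp) :
    (k % Pp = k0) ↔
      ((if 1 ≤ k0 then k0 else Pp) ≤ k ∧ Pp ∣ (k - (if 1 ≤ k0 then k0 else Pp))) := by
  set kF : Int := if 1 ≤ k0 then k0 else Pp with hkF
  have hkFmod : kF % Pp = k0 := by
    rw [hkF]; split_ifs with h
    · exact Int.emod_eq_of_lt hk0.1 hk0.2
    · rw [Int.emod_self]; omega
  have hkFb : 1 ≤ kF ∧ kF ≤ Pp := by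
    rw [hkF]; split_ifs with h <;> omega
  constructor
  · intro hmod
    have hdvd : Pp ∣ k - kF := Int.dvd_of_emod_eq_zero (by
      rw [Int.sub_emod, hmod, hkFmod, sub_self, Int.zero_emod])
    obtain ⟨t, ht⟩ := hdvd
    have htnn : 0 ≤ t := by
      by_cases h : 0 ≤ t
      · exact h
      · exfalso
        have h1 : Pp * t ≤ Pp * (-1) := by
          apply mul_le_mul_of_nonneg_left (by omega) (by omega)
        have h2 : Pp * (-1) = -Pp := by ring
        rw [h2] at h1
        linarith [ht, hkFb.1, hkFb.2, hk]
    have hge : kF ≤ k := by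
      have h0 : 0 ≤ Pp * t := mul_nonneg (le_of_lt hPp) htnn
      linarith [ht]
    exact ⟨hge, ⟨t, ht⟩⟩
  · rintro ⟨hle, t, ht⟩
    have hkeq : k = kF + Pp * t := by linarith [ht]
    rw [hkeq, Int.add_mul_emod_self_left, hkFmod]

-- one step of A's loop transforms the indicator list exactly as B extends `classes`
theorem pvStep_eq (n : Int) (hn : 0 ≤ n) (cl : List (Int × Int))
    (x : (Int × Int × Int × Int) × Int)
    (hx : x.1.1 ≠ 0 ∧ x.1.2.1 ≠ 0 ∧
      (PySem.Int.mod (PySem.Int.mod x.2 x.1.1) x.1.2.1 = 0 → 1 ≤ x.1.2.2.1)) :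
    pvStepA n ((List.range n.toNat).map (pvInd cl)) x =
      (List.range n.toNat).map (pvInd (pvStepB cl x)) := by
  obtain ⟨⟨P, g, Pp, invC⟩, o⟩ := x
  obtain ⟨hP, hg, hPp⟩ := hx
  simp only at hPp
  by_cases hsolv : PySem.Int.mod (PySem.Int.mod o P) g = 0
  · have hPp1 : 1 ≤ Pp := hPp hsolv
    have hPpos : 0 < Pp := by omega
    simp only [pvStepA, pvStepB, if_neg (not_not_intro hsolv), if_pos hsolv]
    set k0 : Int := PySem.Int.mod
      (PySem.Int.mod (PySem.Int.floordiv (PySem.Int.mod o P) g) Pp * invC) Pp with hk0def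
    have hmodPp : ∀ z : Int, PySem.Int.mod z Pp = z % Pp :=
      fun z => PySem.Int.mod_eq_emod_of_pos hPpos
    have hk0 : 0 ≤ k0 ∧ k0 < Pp := by
      rw [hk0def, hmodPp]
      exact ⟨Int.emod_nonneg _ (by omega), Int.emod_lt_of_pos _ hPpos⟩
    have hany : ∀ j : Nat, pvInd (cl ++ [(Pp, k0)]) j =
        if (cl.any (fun c => PySem.Int.mod ((j : Int) + 1) c.1 == c.2)) = true ∨
           ((j : Int) + 1) % Pp = k0 then 1 else 0 := by
      intro j
      simp only [pvInd, List.any_append, List.any_cons, List.any_nil, Bool.or_false,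
        Bool.or_eq_true, beq_iff_eq, hmodPp]
    by_cases hPp1' : Pp = 1
    · -- A marks everything; B's new class (1, k0 = 0) matches every k
      have hk00 : k0 = 0 := by omega
      rw [if_pos hPp1']
      apply List.ext_getElem?
      intro j
      simp only [pvMarkAll]
      rw [pvMarkAll_getElem? 0 n _ j le_rfl]
      rcases Nat.lt_or_ge j n.toNat with hj | hj
      · rw [if_pos (show (0 : Int) ≤ (j : Int) ∧ (j : Int) < n ∧
            j < ((List.range n.toNat).map (pvInd cl)).length by
          simp only [List.length_map, List.length_range]
          refine ⟨by omega, by omega, hj⟩)]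
        rw [List.getElem?_map, List.getElem?_range hj]
        simp only [Option.map_some]
        rw [hany j, hPp1', hk00, Int.emod_one, if_pos (Or.inr rfl)]
      · rw [if_neg (fun h => absurd h.2.2 (by
            simp only [List.length_map, List.length_range]; omega)),
          List.getElem?_map, List.getElem?_map,
          List.getElem?_eq_none (show (List.range n.toNat).length ≤ j by
            simp only [List.length_range]; omega)]
        simp
    · -- the progression branch
      rw [if_neg hPp1']
      apply List.ext_getElem?
      intro j
      rw [pvMarkWhile_getElem? n Pp _ _ j hPpos (by
        split_ifs with h <;> omega)]
      set kF : Int := if 1 ≤ k0 then k0 else Pp with hkF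
      have hkFb : 1 ≤ kF ∧ kF ≤ Pp := by
        rw [hkF]; split_ifs with h <;> omega
      rcases Nat.lt_or_ge j n.toNat with hj | hj
      · have hjlen : j < ((List.range n.toNat).map (pvInd cl)).length := by
          simp only [List.length_map, List.length_range]; omega
        rw [List.getElem?_map, List.getElem?_map, List.getElem?_range hj]
        simp only [Option.map_some]
        have hres := pvResidue_iff Pp k0 ((j : Int) + 1) hPpos (by omega) hk0
        rw [← hkF] at hres
        by_cases hc : kF - 1 ≤ (j : Int) ∧ (j : Int) < n ∧ Pp ∣ ((j : Int) - (kF - 1))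
        · rw [if_pos (show kF - 1 ≤ (j : Int) ∧ (j : Int) < n ∧ j < _ ∧
              Pp ∣ ((j : Int) - (kF - 1)) from ⟨hc.1, hc.2.1, hjlen, hc.2.2⟩)]
          rw [hany j, if_pos (Or.inr (hres.2 ⟨by omega, by
            have h := hc.2.2
            rwa [show (j : Int) - (kF - 1) = ((j : Int) + 1) - kF by ring] at h⟩))]
        · rw [if_neg (fun h => hc ⟨h.1, h.2.1, h.2.2.2⟩)]
          rw [hany j]
          simp only [pvInd]
          by_cases hcl : cl.any (fun c => PySem.Int.mod ((j : Int) + 1) c.1 == c.2) = true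
          · rw [if_pos hcl, if_pos (Or.inl hcl)]
          · rw [if_neg hcl, if_neg (by
              rintro (h | h)
              · exact hcl h
              · refine hc ⟨by omega, by omega, ?_⟩
                have h2 := (hres.1 h).2
                rwa [show ((j : Int) + 1) - kF = (j : Int) - (kF - 1) by ring] at h2)]
      · rw [if_neg (fun h => absurd h.2.2.1 (by
            simp only [List.length_map, List.length_range]; omega)),
          List.getElem?_map, List.getElem?_map,
          List.getElem?_eq_none (show (List.range n.toNat).length ≤ j by
            simp only [List.length_range]; omega)]
        simp
  · -- not solvable: both sides unchanged
    simp only [pvStepA, pvStepB, if_pos hsolv, if_neg hsolv]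

theorem pvFold_eq (n : Int) (hn : 0 ≤ n) (L : List ((Int × Int × Int × Int) × Int))
    (cl : List (Int × Int))
    (hL : ∀ x ∈ L, x.1.1 ≠ 0 ∧ x.1.2.1 ≠ 0 ∧
      (PySem.Int.mod (PySem.Int.mod x.2 x.1.1) x.1.2.1 = 0 → 1 ≤ x.1.2.2.1)) :
    L.foldl (pvStepA n) ((List.range n.toNat).map (pvInd cl)) =
      (List.range n.toNat).map (pvInd (L.foldl pvStepB cl)) := by
  induction L generalizing cl with
  | nil => simp
  | cons x xs ih =>
    simp only [List.foldl_cons]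
    rw [pvStep_eq n hn cl x (hL x List.mem_cons_self)]
    exact ih _ (fun y hy => hL y (List.mem_cons_of_mem x hy))

-- ===== VERDICT (by name: the statement is the Claim_ definition above) =====
theorem union_overlap_count_fast_spec : Claim_equal_union_overlap_count_fast := by
  intro C predator_periods H offsets precomp _hDom hPre
  obtain ⟨hC, hn, hzip⟩ := hPre
  unfold Spec_union_overlap_count_fast
  simp only [union_overlap_count_fast, union_overlap_count_fast_alt]
  set n := PySem.Int.floordiv H C with hndef
  have hrepl : (List.replicate n.toNat (0 : Int)) = (List.range n.toNat).map (pvInd []) := by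
    have h0 : pvInd ([] : List (Int × Int)) = fun _ => (0 : Int) := funext fun j => rfl
    rw [h0, List.map_const', List.length_range]
  rw [hrepl, pvFold_eq n hn (precomp.zip offsets) [] hzip]
  set cl := (precomp.zip offsets).foldl pvStepB [] with hcl
  have hsum : ((List.range n.toNat).map (pvInd cl)).sum =
      ((List.countP (fun j : Nat =>
        cl.any (fun c => PySem.Int.mod ((j : Int) + 1) c.1 == c.2)) (List.range n.toNat) : Nat) : Int) :=
    PySem.List.sum_map_ite_one_zero _ _
  rw [hsum]
  have hrange : PySem.List.pyRange 1 (n + 1) 1 =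
      (List.range n.toNat).map (fun k : Nat => 1 + (k : Int)) := by
    rw [PySem.List.pyRange_one]
    congr 2
    omega
  rw [hrange, ← List.countP_eq_length_filter, List.countP_map]
  congr 2
  funext j
  simp only [Function.comp]
  rw [add_comm 1 (j : Int)]
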